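-- pv_equiv track=rewrite | github.com/mrbartrns/algorithm-and-structure | coding_test_with_python/greedy/t6.py | solution
-- ===== SOURCE A (Python) =====
-- def solution(food_times, k):
--     idx = 0
--     cnt = 0
--     while cnt < k:
--         if food_times[idx] > 0:
--             food_times[idx] -= 1
--             cnt += 1
--         idx = (idx + 1) % len(food_times)
--     # 아무것도 먹을 것이 없을 때에 -1을 반환하기
--     current = idx
--     while food_times[idx] == 0:
--         idx = (idx + 1) % len(food_times)
--         if idx == current:
--             return -1
--     return idx + 1
-- ===== SOURCE B (Python) =====
-- def solution(food_times, k):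
--     n = len(food_times)
--     a = list(food_times)
--     rem = k
--     last = None  # index of the last bite
--     while rem > 0:
--         pos = [i for i in range(n) if a[i] > 0]
--         m = len(pos)
--         if m == 0:
--             break
--         mn = min(a[i] for i in pos)
--         t = min(rem // m, mn)
--         if t > 0:
--             # take t whole rounds at once
--             a = [x - t if x > 0 else x for x in a]
--             rem -= t * m
--             last = pos[-1]
--         else:
--             # partial round: fewer than m bites left
--             chosen = pos[:rem]
--             chosen_set = set(chosen)
--             a = [a[i] - 1 if i in chosen_set else a[i] for i in range(n)]
--             last = chosen[-1]
--             rem = 0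
--     idx = 0 if last is None else (last + 1) % n
--     cur = idx
--     if a[idx] != 0:
--         return idx + 1
--     while True:
--         idx = (idx + 1) % n
--         if idx == cur:
--             return -1
--         if a[idx] != 0:
--             return idx + 1
-- ===== Notes on version B (the rewrite author's own statement) =====
-- stated objective: alternative
-- what changed: Replaces A's bite-by-bite round-robin simulation (one loop iteration per visited cell) by batch processing: compute the positive positions once per batch and subtract min(rem//m, min positive value) whole rounds at once, then finish with one partial sweep.
import Mathlib
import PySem

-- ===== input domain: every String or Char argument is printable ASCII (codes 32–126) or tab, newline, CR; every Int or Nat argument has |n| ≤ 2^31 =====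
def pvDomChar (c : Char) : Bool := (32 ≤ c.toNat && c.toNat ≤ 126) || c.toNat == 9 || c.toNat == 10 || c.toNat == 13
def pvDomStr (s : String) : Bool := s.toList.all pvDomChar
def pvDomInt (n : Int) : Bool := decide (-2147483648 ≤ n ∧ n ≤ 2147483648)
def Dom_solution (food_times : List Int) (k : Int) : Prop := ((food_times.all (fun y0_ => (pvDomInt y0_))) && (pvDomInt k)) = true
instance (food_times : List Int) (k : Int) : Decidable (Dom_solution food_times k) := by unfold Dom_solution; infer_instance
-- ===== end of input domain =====

-- B replaces A's bite-by-bite round-robin simulation by batching: it subtracts whole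
-- rounds from every positive entry at once instead of simulating single bites.
-- A mutates its argument list in place; the equivalence proved here is about the return value only.

-- ===== PORT A =====
-- the `while cnt < k` loop; fuel only makes the recursion structural, it is never
-- exhausted on inputs satisfying Pre_solution
def eatA (k : Int) : Nat → List Int → Nat → Int → List Int × Nat
  | 0, a, idx, _ => (a, idx)
  | f+1, a, idx, cnt =>
    if cnt < k then
      if 0 < a.getD idx 0 then
        eatA k f (a.set idx (a.getD idx 0 - 1)) ((idx + 1) % a.length) (cnt + 1)
      else
        eatA k f a ((idx + 1) % a.length) cnt
    else (a, idx)

-- the final `while food_times[idx] == 0` scan (shared verbatim by A and B's Python);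
-- fuel a.length is exact: the walk returns to `cur` after at most a.length steps
def pyScanNext : Nat → List Int → Nat → Nat → Int
  | f, a, idx, cur =>
    if a.getD idx 0 = 0 then
      match f with
      | 0 => -1
      | f'+1 =>
        let idx' := (idx + 1) % a.length
        if idx' = cur then -1 else pyScanNext f' a idx' cur
    else (idx : Int) + 1

def solution (food_times : List Int) (k : Int) : Int :=
  let n := food_times.length
  let r := eatA k ((k.toNat + 1) * (n + 1)) food_times 0 0
  pyScanNext n r.1 r.2 r.2

-- ===== PORT B =====
-- the batched eating loop of Source B; `last` is the index of the last bite.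
-- fuel a.length + 2 is enough: every batch with t = mn zeroes a positive entry,
-- a batch with t = rem // m < mn is followed by at most one partial round.
def eatB : Nat → List Int → Int → Option Nat → List Int × Option Nat
  | 0, a, _, last => (a, last)
  | f+1, a, rem, last =>
    if 0 < rem then
      let pos := (List.range a.length).filter (fun i => 0 < a.getD i 0)
      if pos.isEmpty then (a, last)      -- Source B: break
      else
        let m : Int := (pos.length : Int)
        let mn := ((pos.map (fun i => a.getD i 0)).min?).getD 0   -- pos ≠ [] so min? = some _
        let t := min (PySem.Int.floordiv rem m) mn
        if 0 < t then
          -- t whole rounds at once: a = [x - t if x > 0 else x for x in a]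
          eatB f (a.map (fun x => if 0 < x then x - t else x)) (rem - t * m)
            (some (pos.getLast?.getD 0))
        else
          -- partial round: rem < m bites, then rem = 0 and the loop exits
          let chosen := pos.take rem.toNat
          ((List.range a.length).map (fun i => if i ∈ chosen then a.getD i 0 - 1 else a.getD i 0),
           some (chosen.getLast?.getD 0))
    else (a, last)

def solution_alt (food_times : List Int) (k : Int) : Int :=
  let n := food_times.length
  let r := eatB (n + 2) food_times k none
  let idx := match r.2 with | none => 0 | some p => (p + 1) % n
  pyScanNext n r.1 idx idx

-- ===== PRECONDITION & SPEC =====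
-- Pre_ is exactly where the Python A returns: on [] it raises IndexError, and with
-- k greater than the total positive food it loops forever.
def Pre_solution (food_times : List Int) (k : Int) : Prop :=
  food_times ≠ [] ∧ k ≤ (food_times.map (fun x => max x 0)).sum
instance (food_times : List Int) (k : Int) : Decidable (Pre_solution food_times k) := by
  unfold Pre_solution; infer_instance

def pvWitness_solution : List Int × Int := ([3, 1, 2], 5)

def Spec_solution (food_times : List Int) (k : Int) (out : Int) : Prop := out = solution_alt food_times k
instance (food_times : List Int) (k : Int) (out : Int) : Decidable (Spec_solution food_times k out) := by unfold Spec_solution; infer_instance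

-- ===== CLAIM (what is proved, stated in full; the proofs are below) =====
def Claim_equal_solution : Prop := ∀ (food_times : List Int) (k : Int), Dom_solution food_times k → Pre_solution food_times k → Spec_solution food_times k (solution food_times k)

-- ===== LEMMAS AND PROOFS =====

-- abbreviations used only by the proofs
def posOf (a : List Int) : List Nat := (List.range a.length).filter (fun i => 0 < a.getD i 0)
def posFrom (a : List Int) (idx : Nat) : List Nat :=
  (List.range' idx (a.length - idx)).filter (fun i => 0 < a.getD i 0)
def decFrom (a : List Int) (idx : Nat) : List Int :=
  (List.range a.length).map (fun i => if idx ≤ i ∧ 0 < a.getD i 0 then a.getD i 0 - 1 else a.getD i 0)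
def decTake (a : List Int) (idx j : Nat) : List Int :=
  (List.range a.length).map (fun i => if i ∈ (posFrom a idx).take j then a.getD i 0 - 1 else a.getD i 0)
def decBy (t : Int) (a : List Int) : List Int := a.map (fun x => if 0 < x then x - t else x)
def sumPos (a : List Int) : Int := (a.map (fun x => max x 0)).sum


-- ---- elementwise toolkit ----
theorem map_getD_range (a : List Int) : (List.range a.length).map (fun i => a.getD i 0) = a := by
  apply List.ext_getElem
  · simp
  · intro i h1 h2
    simp [List.getD_eq_getElem?_getD, List.getElem?_eq_getElem h2]

theorem length_decFrom (a : List Int) (idx : Nat) : (decFrom a idx).length = a.length := by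
  simp [decFrom]

theorem getD_decFrom (a : List Int) (idx i : Nat) (h : i < a.length) :
    (decFrom a idx).getD i 0 = if idx ≤ i ∧ 0 < a.getD i 0 then a.getD i 0 - 1 else a.getD i 0 := by
  simp [decFrom, List.getD_eq_getElem?_getD, h]

theorem getD_set_self (a : List Int) (i : Nat) (v : Int) (h : i < a.length) :
    (a.set i v).getD i 0 = v := by
  simp [List.getD_eq_getElem?_getD, h]

theorem getD_set_ne (a : List Int) (i j : Nat) (v : Int) (hne : i ≠ j) :
    (a.set i v).getD j 0 = a.getD j 0 := by
  simp [List.getD_eq_getElem?_getD, List.getElem?_set_ne hne]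

theorem eatA_succ (k : Int) (f : Nat) (a : List Int) (idx : Nat) (cnt : Int) :
    eatA k (f + 1) a idx cnt
      = if cnt < k then
          if 0 < a.getD idx 0 then
            eatA k f (a.set idx (a.getD idx 0 - 1)) ((idx + 1) % a.length) (cnt + 1)
          else eatA k f a ((idx + 1) % a.length) cnt
        else (a, idx) := rfl

-- ---- posFrom / decFrom structure ----
theorem posFrom_ge (a : List Int) (idx : Nat) (h : a.length ≤ idx) : posFrom a idx = [] := by
  unfold posFrom
  have : a.length - idx = 0 := by omega
  simp [this]

theorem posFrom_cons (a : List Int) (idx : Nat) (h : idx < a.length) :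
    posFrom a idx = if 0 < a.getD idx 0 then idx :: posFrom a (idx + 1) else posFrom a (idx + 1) := by
  unfold posFrom
  have h1 : a.length - idx = (a.length - (idx + 1)) + 1 := by omega
  rw [h1, List.range'_succ, List.filter_cons]
  by_cases h0 : 0 < a.getD idx 0 <;> simp [h0]

theorem posFrom_set_succ (a : List Int) (idx : Nat) (v : Int) :
    posFrom (a.set idx v) (idx + 1) = posFrom a (idx + 1) := by
  unfold posFrom
  rw [List.length_set]
  apply List.filter_congr
  intro i hi
  have : idx + 1 ≤ i := (List.mem_range'_1.mp hi).1
  rw [getD_set_ne a idx i v (by omega)]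

theorem mem_posFrom (a : List Int) (idx i : Nat) (h : i ∈ posFrom a idx) :
    idx ≤ i ∧ i < a.length ∧ 0 < a.getD i 0 := by
  unfold posFrom at h
  rcases List.mem_filter.mp h with ⟨hr, hp⟩
  rcases List.mem_range'_1.mp hr with ⟨h1, h2⟩
  exact ⟨h1, by omega, by simpa using hp⟩

theorem decFrom_set_succ (a : List Int) (idx : Nat) (hidx : idx < a.length)
    (h0 : 0 < a.getD idx 0) :
    decFrom (a.set idx (a.getD idx 0 - 1)) (idx + 1) = decFrom a idx := by
  apply List.ext_getElem
  · simp [length_decFrom]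
  · intro i hi1 hi2
    have hn : i < a.length := by simpa [length_decFrom] using hi2
    have e1 : (decFrom (a.set idx (a.getD idx 0 - 1)) (idx + 1)).getD i 0 = _ :=
      getD_decFrom (a.set idx (a.getD idx 0 - 1)) (idx + 1) i (by simpa using hn)
    have e2 : (decFrom a idx).getD i 0 = _ := getD_decFrom a idx i hn
    rw [← List.getD_eq_getElem _ 0, ← List.getD_eq_getElem _ 0, e1, e2]
    rcases Nat.lt_trichotomy i idx with hlt | heq | hgt
    · rw [getD_set_ne a idx i _ (by omega)]
      have c1 : ¬ (idx + 1 ≤ i) := by omega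
      have c2 : ¬ (idx ≤ i) := by omega
      simp [c1, c2]
    · subst heq
      rw [getD_set_self a i _ hn]
      have c1 : ¬ (i + 1 ≤ i) := by omega
      have h0' : 0 < a[i]?.getD 0 := by simpa using h0
      simp [c1, h0']
    · rw [getD_set_ne a idx i _ (by omega)]
      have c1 : (idx + 1 ≤ i) ↔ True := by constructor <;> intro <;> first | trivial | omega
      have c2 : (idx ≤ i) ↔ True := by constructor <;> intro <;> first | trivial | omega
      simp [c1, c2]

theorem decFrom_last_pos (a : List Int) (idx : Nat) (hlen : a.length = idx + 1)
    (h0 : 0 < a.getD idx 0) : decFrom a idx = a.set idx (a.getD idx 0 - 1) := by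
  apply List.ext_getElem
  · simp [length_decFrom, hlen]
  · intro i hi1 hi2
    have hn : i < a.length := by simpa [length_decFrom] using hi1
    rw [← List.getD_eq_getElem _ 0, ← List.getD_eq_getElem _ 0, getD_decFrom a idx i hn]
    rcases Nat.lt_trichotomy i idx with hlt | heq | hgt
    · rw [getD_set_ne a idx i _ (by omega)]
      have c : ¬ (idx ≤ i) := by omega
      simp [c]
    · subst heq
      rw [getD_set_self a i _ hn]
      have h0' : 0 < a[i]?.getD 0 := by simpa using h0
      simp [h0']
    · omega
theorem decFrom_last_nonpos (a : List Int) (idx : Nat) (hlen : a.length = idx + 1)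
    (h0 : ¬ 0 < a.getD idx 0) : decFrom a idx = a := by
  apply List.ext_getElem
  · simp [length_decFrom]
  · intro i hi1 hi2
    have hn : i < a.length := by simpa [length_decFrom] using hi1
    rw [← List.getD_eq_getElem _ 0, ← List.getD_eq_getElem _ 0, getD_decFrom a idx i hn]
    rcases Nat.lt_trichotomy i idx with hlt | heq | hgt
    · have c : ¬ (idx ≤ i) := by omega
      simp [c]
    · subst heq
      have h0' : a[i]?.getD 0 ≤ 0 := by simpa [not_lt] using h0
      simp [h0']
    · omega

theorem length_decTake (a : List Int) (idx j : Nat) : (decTake a idx j).length = a.length := by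
  simp [decTake]

theorem getD_decTake (a : List Int) (idx j i : Nat) (h : i < a.length) :
    (decTake a idx j).getD i 0 =
      if i ∈ (posFrom a idx).take j then a.getD i 0 - 1 else a.getD i 0 := by
  simp [decTake, List.getD_eq_getElem?_getD, h]

theorem decTake_set_succ (a : List Int) (idx : Nat) (hidx : idx < a.length)
    (h0 : 0 < a.getD idx 0) (j : Nat) :
    decTake a idx (j + 1) = decTake (a.set idx (a.getD idx 0 - 1)) (idx + 1) j := by
  have hpos : posFrom a idx = idx :: posFrom a (idx + 1) := by
    rw [posFrom_cons a idx hidx, if_pos h0]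
  apply List.ext_getElem
  · simp [length_decTake]
  · intro i hi1 hi2
    have hn : i < a.length := by simpa [length_decTake] using hi1
    rw [← List.getD_eq_getElem _ 0, ← List.getD_eq_getElem _ 0, getD_decTake a idx (j + 1) i hn,
      getD_decTake (a.set idx (a.getD idx 0 - 1)) (idx + 1) j i (by simpa using hn), hpos]
    have hpos' : posFrom (a.set idx (a.getD idx 0 - 1)) (idx + 1) = posFrom a (idx + 1) :=
      posFrom_set_succ a idx _
    rw [List.take_succ_cons, hpos']
    rcases Nat.lt_trichotomy i idx with hlt | heq | hgt
    · have m1 : i ∉ (idx :: (posFrom a (idx + 1)).take j) := by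
        intro hmem
        rcases List.mem_cons.mp hmem with h | h
        · omega
        · have := mem_posFrom _ _ _ (List.mem_of_mem_take h); omega
      have m2 : i ∉ ((posFrom a (idx + 1)).take j) := by
        intro hmem
        have := mem_posFrom _ _ _ (List.mem_of_mem_take hmem); omega
      rw [if_neg m1, if_neg m2, getD_set_ne a idx i _ (by omega)]
    · subst heq
      have m1 : i ∈ (i :: (posFrom a (i + 1)).take j) := List.mem_cons_self
      have m2 : i ∉ ((posFrom a (i + 1)).take j) := by
        intro hmem
        have := mem_posFrom _ _ _ (List.mem_of_mem_take hmem); omega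
      rw [if_pos m1, if_neg m2, getD_set_self a i _ hn]
    · have heq : (i ∈ idx :: (posFrom a (idx + 1)).take j) ↔ (i ∈ (posFrom a (idx + 1)).take j) := by
        constructor
        · intro hmem
          rcases List.mem_cons.mp hmem with h | h
          · omega
          · exact h
        · intro hmem; exact List.mem_cons_of_mem _ hmem
      rw [getD_set_ne a idx i _ (by omega)]
      by_cases hm : i ∈ (posFrom a (idx + 1)).take j
      · rw [if_pos (heq.mpr hm), if_pos hm]
      · rw [if_neg (fun h => hm (heq.mp h)), if_neg hm]

theorem decTake_one (a : List Int) (idx : Nat) (hidx : idx < a.length)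
    (h0 : 0 < a.getD idx 0) :
    decTake a idx 1 = a.set idx (a.getD idx 0 - 1) := by
  have hpos : posFrom a idx = idx :: posFrom a (idx + 1) := by
    rw [posFrom_cons a idx hidx, if_pos h0]
  apply List.ext_getElem
  · simp [length_decTake]
  · intro i hi1 hi2
    have hn : i < a.length := by simpa [length_decTake] using hi1
    rw [← List.getD_eq_getElem _ 0, ← List.getD_eq_getElem _ 0, getD_decTake a idx 1 i hn, hpos]
    rw [List.take_succ_cons, List.take_zero]
    rcases eq_or_ne i idx with heq | hne
    · subst heq
      rw [if_pos (by simp), getD_set_self a i _ hn]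
    · rw [if_neg (by simp [hne]), getD_set_ne a idx i _ (Ne.symm hne)]

theorem decTake_skip (a : List Int) (idx : Nat) (hidx : idx < a.length)
    (h0 : ¬ 0 < a.getD idx 0) (j : Nat) : decTake a idx j = decTake a (idx + 1) j := by
  have hpos : posFrom a idx = posFrom a (idx + 1) := by
    rw [posFrom_cons a idx hidx, if_neg h0]
  unfold decTake
  rw [hpos]

-- ---- pass lemma, exit form: the k-th bite happens in this sweep ----
theorem passC2 (k : Int) : ∀ (d : Nat) (a : List Int) (idx : Nat) (cnt : Int) (j : Nat),
    a.length = idx + d → 1 ≤ d → cnt < k → k - cnt = (j : Int) + 1 →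
    j < (posFrom a idx).length →
    ∀ f, d + 1 ≤ f →
      eatA k f a idx cnt
        = (decTake a idx (j + 1), ((posFrom a idx).getD j 0 + 1) % a.length) := by
  intro d
  induction d with
  | zero => intro a idx cnt j _ hd; omega
  | succ d ih =>
    intro a idx cnt j hlen _ hcnt hk hj f hf
    have hidx : idx < a.length := by omega
    obtain ⟨f', rfl⟩ : ∃ f', f = f' + 1 := ⟨f - 1, by omega⟩
    rw [eatA_succ]
    rw [if_pos hcnt]
    by_cases h0 : 0 < a.getD idx 0
    · rw [if_pos h0]
      have hpos : posFrom a idx = idx :: posFrom a (idx + 1) := by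
        rw [posFrom_cons a idx hidx, if_pos h0]
      cases j with
      | zero =>
        obtain ⟨f'', rfl⟩ : ∃ f'', f' = f'' + 1 := ⟨f' - 1, by omega⟩
        have hstop : ¬ (cnt + 1 < k) := by omega
        rw [eatA_succ]
        rw [if_neg hstop]
        rw [decTake_one a idx hidx h0, hpos]
        simp
      | succ j' =>
        have hne : posFrom a (idx + 1) ≠ [] := by
          intro hnil
          rw [hpos, hnil] at hj
          simp at hj
        have hd1 : 1 ≤ d := by
          obtain ⟨i, hi⟩ := List.exists_mem_of_ne_nil _ hne
          have := mem_posFrom a (idx + 1) i hi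
          omega
        have hmod : (idx + 1) % a.length = idx + 1 := Nat.mod_eq_of_lt (by omega)
        rw [hmod]
        have hpos' : posFrom (a.set idx (a.getD idx 0 - 1)) (idx + 1) = posFrom a (idx + 1) :=
          posFrom_set_succ a idx _
        rw [ih (a.set idx (a.getD idx 0 - 1)) (idx + 1) (cnt + 1) j'
          (by simp; omega) hd1 (by omega) (by push_cast at hk ⊢; omega)
          (by rw [hpos']; rw [hpos] at hj; simpa using hj) f' (by omega)]
        rw [decTake_set_succ a idx hidx h0 (j' + 1), hpos, hpos']
        rw [show (a.set idx (a.getD idx 0 - 1)).length = a.length by simp]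
        rw [List.getD_cons_succ]
    · rw [if_neg h0]
      have hpos : posFrom a idx = posFrom a (idx + 1) := by
        rw [posFrom_cons a idx hidx, if_neg h0]
      have hne : posFrom a (idx + 1) ≠ [] := by
        intro hnil
        rw [hpos, hnil] at hj
        simp at hj
      have hd1 : 1 ≤ d := by
        obtain ⟨i, hi⟩ := List.exists_mem_of_ne_nil _ hne
        have := mem_posFrom a (idx + 1) i hi
        omega
      have hmod : (idx + 1) % a.length = idx + 1 := Nat.mod_eq_of_lt (by omega)
      rw [hmod]
      rw [ih a (idx + 1) cnt j (by omega) hd1 hcnt hk (by rw [← hpos]; exact hj) f' (by omega)]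
      rw [decTake_skip a idx hidx h0, hpos]

-- ---- pass lemma, continuation form: one sweep idx..n-1 with more than enough bites left ----
theorem passC1 (k : Int) : ∀ (d : Nat) (a : List Int) (idx : Nat) (cnt : Int),
    a.length = idx + d → 1 ≤ d → cnt < k →
    ((posFrom a idx).length : Int) < k - cnt →
    ∀ f, eatA k (d + f) a idx cnt
        = eatA k f (decFrom a idx) 0 (cnt + (posFrom a idx).length) := by
  intro d
  induction d with
  | zero => intro a idx cnt _ hd; omega
  | succ d ih =>
    intro a idx cnt hlen _ hcnt hlt f
    have hidx : idx < a.length := by omega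
    have hfuel : d + 1 + f = (d + f) + 1 := by omega
    rw [hfuel]
    rw [eatA_succ]
    rw [if_pos hcnt]
    by_cases h0 : 0 < a.getD idx 0
    · rw [if_pos h0]
      have hpos : posFrom a idx = idx :: posFrom a (idx + 1) := by
        rw [posFrom_cons a idx hidx, if_pos h0]
      rcases Nat.eq_zero_or_pos d with hd0 | hd1
      · subst hd0
        have hlast : a.length = idx + 1 := by omega
        have hmod : (idx + 1) % a.length = 0 := by rw [hlast]; simp
        rw [hmod]
        have hempty : posFrom a (idx + 1) = [] := posFrom_ge a (idx + 1) (by omega)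
        rw [hpos, hempty]
        rw [decFrom_last_pos a idx hlast h0]
        simp
      · have hmod : (idx + 1) % a.length = idx + 1 := Nat.mod_eq_of_lt (by omega)
        rw [hmod]
        have hset : (a.set idx (a.getD idx 0 - 1)).length = idx + 1 + d := by
          simp; omega
        have hpos' : posFrom (a.set idx (a.getD idx 0 - 1)) (idx + 1) = posFrom a (idx + 1) :=
          posFrom_set_succ a idx _
        have hcnt' : cnt + 1 < k := by
          rw [hpos] at hlt; simp at hlt; omega
        have hlt' : ((posFrom (a.set idx (a.getD idx 0 - 1)) (idx + 1)).length : Int)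
            < k - (cnt + 1) := by
          rw [hpos']; rw [hpos] at hlt; simp at hlt; omega
        rw [ih (a.set idx (a.getD idx 0 - 1)) (idx + 1) (cnt + 1) hset hd1 hcnt' hlt' f]
        rw [decFrom_set_succ a idx hidx h0, hpos', hpos]
        congr 1
        simp; ring
    · rw [if_neg h0]
      have hpos : posFrom a idx = posFrom a (idx + 1) := by
        rw [posFrom_cons a idx hidx, if_neg h0]
      rcases Nat.eq_zero_or_pos d with hd0 | hd1
      · subst hd0
        have hlast : a.length = idx + 1 := by omega
        have hmod : (idx + 1) % a.length = 0 := by rw [hlast]; simp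
        rw [hmod]
        have hempty : posFrom a (idx + 1) = [] := posFrom_ge a (idx + 1) (by omega)
        rw [hpos, hempty, decFrom_last_nonpos a idx hlast h0]
        simp
      · have hmod : (idx + 1) % a.length = idx + 1 := Nat.mod_eq_of_lt (by omega)
        rw [hmod]
        have hlt' : ((posFrom a (idx + 1)).length : Int) < k - cnt := by rw [← hpos]; exact hlt
        rw [ih a (idx + 1) cnt (by omega) hd1 hcnt hlt' f]
        rw [hpos]
        congr 1
        apply List.ext_getElem
        · simp [length_decFrom]
        · intro i hi1 hi2
          have hn : i < a.length := by simpa [length_decFrom] using hi1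
          rw [← List.getD_eq_getElem _ 0, ← List.getD_eq_getElem _ 0,
            getD_decFrom a (idx + 1) i hn, getD_decFrom a idx i hn]
          rcases Nat.lt_trichotomy i idx with hlt2 | heq | hgt
          · have c1 : ¬ (idx + 1 ≤ i) := by omega
            have c2 : ¬ (idx ≤ i) := by omega
            simp [c1, c2]
          · subst heq
            have h0' : a[i]?.getD 0 ≤ 0 := by simpa [not_lt] using h0
            simp [h0']
          · have c1 : (idx + 1 ≤ i) ↔ True := by constructor <;> intro <;> first | trivial | omega
            have c2 : (idx ≤ i) ↔ True := by constructor <;> intro <;> first | trivial | omega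
            simp [c1, c2, h0]


-- ---- decBy / posOf / sumPos aggregates ----
theorem posOf_eq_posFrom_zero (a : List Int) : posOf a = posFrom a 0 := by
  unfold posOf posFrom
  rw [List.range_eq_range']
  simp

theorem length_decBy (t : Int) (a : List Int) : (decBy t a).length = a.length := by
  simp [decBy]

theorem getD_decBy (t : Int) (a : List Int) (i : Nat) (h : i < a.length) :
    (decBy t a).getD i 0 = if 0 < a.getD i 0 then a.getD i 0 - t else a.getD i 0 := by
  simp [decBy, List.getD_eq_getElem?_getD, h]

theorem posOf_decBy_filter (t : Int) (a : List Int) :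
    posOf (decBy t a) = (posOf a).filter (fun i => 0 < (decBy t a).getD i 0) := by
  unfold posOf
  rw [length_decBy, List.filter_filter]
  apply List.filter_congr
  intro i hi
  have hilt : i < a.length := List.mem_range.mp hi
  have hgoal : ∀ (p q : Bool), (p = true → q = true) → p = (p && q) := by decide
  apply hgoal
  simp only [decide_eq_true_eq]
  intro hp
  rw [getD_decBy t a i hilt] at hp
  by_cases h0 : 0 < a.getD i 0
  · exact h0
  · rw [if_neg h0] at hp
    exact absurd hp h0

theorem decBy_zero (a : List Int) : decBy 0 a = a := by
  simp [decBy]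

theorem getD_mem (a : List Int) (i : Nat) (h : i < a.length) : a.getD i 0 ∈ a := by
  rw [List.getD_eq_getElem _ _ h]
  exact List.getElem_mem h

theorem posOf_decBy (t : Int) (a : List Int)
    (h : ∀ x ∈ a, 0 < x → t + 1 ≤ x) : posOf (decBy t a) = posOf a := by
  unfold posOf
  rw [length_decBy]
  apply List.filter_congr
  intro i hi
  have hilt : i < a.length := List.mem_range.mp hi
  rw [getD_decBy t a i hilt]
  by_cases h0 : 0 < a.getD i 0
  · rw [if_pos h0]
    have ht := h _ (getD_mem a i hilt) h0
    have h1 : 0 < a.getD i 0 - t := by omega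
    simp only [h0, h1, decide_true]
  · rw [if_neg h0]

theorem decFrom_zero (a : List Int) : decFrom a 0 = decBy 1 a := by
  apply List.ext_getElem
  · simp [length_decFrom, length_decBy]
  · intro i hi1 hi2
    have hn : i < a.length := by simpa [length_decFrom] using hi1
    rw [← List.getD_eq_getElem _ 0, ← List.getD_eq_getElem _ 0, getD_decFrom a 0 i hn,
      getD_decBy 1 a i hn]
    simp

theorem decTake_all (a : List Int) (j : Nat) (h : (posFrom a 0).length ≤ j) :
    decTake a 0 j = decBy 1 a := by
  apply List.ext_getElem
  · simp [length_decTake, length_decBy]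
  · intro i hi1 hi2
    have hn : i < a.length := by simpa [length_decTake] using hi1
    rw [← List.getD_eq_getElem _ 0, ← List.getD_eq_getElem _ 0, getD_decTake a 0 j i hn,
      getD_decBy 1 a i hn, List.take_of_length_le h]
    by_cases h0 : 0 < a.getD i 0
    · have hm : i ∈ posFrom a 0 := by
        rw [← posOf_eq_posFrom_zero]
        unfold posOf
        exact List.mem_filter.mpr ⟨List.mem_range.mpr hn, by simpa using h0⟩
      rw [if_pos hm, if_pos h0]
    · have hm : i ∉ posFrom a 0 := fun hm => h0 (mem_posFrom a 0 i hm).2.2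
      rw [if_neg hm, if_neg h0]

theorem decBy_decBy (s t : Int) (a : List Int) (hs : 0 ≤ s)
    (h : ∀ x ∈ a, 0 < x → s + t ≤ x) : decBy s (decBy t a) = decBy (s + t) a := by
  unfold decBy
  rw [List.map_map]
  apply List.map_congr_left
  intro x hx
  simp only [Function.comp]
  by_cases h0 : 0 < x
  · have hx' := h x hx h0
    by_cases hs0 : s = 0
    · subst hs0
      rw [if_pos h0]
      split <;> ring
    · have h1 : 0 < x - t := by omega
      rw [if_pos h0, if_pos h1, if_pos h0]
      ring
  · rw [if_neg h0, if_neg h0, if_neg h0]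

theorem sumPos_decBy (t : Int) (a : List Int) (ht : 0 ≤ t)
    (h : ∀ x ∈ a, 0 < x → t ≤ x) :
    sumPos (decBy t a) = sumPos a - t * a.countP (fun x => decide (0 < x)) := by
  induction a with
  | nil => simp [sumPos, decBy]
  | cons x xs ih =>
    have hx : ∀ y ∈ xs, 0 < y → t ≤ y := fun y hy => h y (List.mem_cons_of_mem _ hy)
    have ih' := ih hx
    unfold sumPos decBy at ih' ⊢
    simp only [List.map_cons, List.sum_cons, List.countP_cons]
    by_cases h0 : 0 < x
    · have hxt := h x List.mem_cons_self h0
      have e1 : max x 0 = x := by omega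
      have e2 : max (x - t) 0 = x - t := by omega
      rw [if_pos h0, e2, e1, ih']
      simp only [h0, decide_true, if_pos]
      push_cast
      ring
    · have e1 : max x 0 = 0 := by omega
      rw [if_neg h0, e1, ih']
      simp only [h0, decide_false, if_neg]
      simp

theorem posOf_length_countP (a : List Int) :
    (posOf a).length = a.countP (fun x => decide (0 < x)) := by
  unfold posOf
  rw [← List.countP_eq_length_filter]
  conv_rhs => rw [← map_getD_range a]
  rw [List.countP_map]
  rfl

theorem posOf_ne_nil_of_sumPos (a : List Int) (h : 0 < sumPos a) : posOf a ≠ [] := by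
  intro hnil
  have hcount : a.countP (fun x => decide (0 < x)) = 0 := by
    rw [← posOf_length_countP, hnil]
    rfl
  have : sumPos a = 0 := by
    unfold sumPos
    apply List.sum_eq_zero
    intro y hy
    rcases List.mem_map.mp hy with ⟨x, hx, rfl⟩
    have : ¬ 0 < x := by
      intro h0
      have := List.countP_eq_zero.mp hcount x hx
      simp [h0] at this
    omega
  omega

theorem mem_posOf (a : List Int) (i : Nat) (h : i ∈ posOf a) :
    i < a.length ∧ 0 < a.getD i 0 := by
  have := mem_posFrom a 0 i (by rwa [← posOf_eq_posFrom_zero])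
  exact ⟨this.2.1, this.2.2⟩

-- ---- t whole rounds at once ----
theorem rounds (k : Int) : ∀ (t : Nat) (a : List Int) (cnt : Int),
    a ≠ [] → (∀ x ∈ a, 0 < x → (t : Int) ≤ x) →
    (t : Int) * (posOf a).length < k - cnt →
    ∀ f, eatA k (t * a.length + f) a 0 cnt
        = eatA k f (decBy t a) 0 (cnt + (t : Int) * (posOf a).length) := by
  intro t
  induction t with
  | zero =>
    intro a cnt _ _ _ f
    push_cast
    rw [decBy_zero]
    simp
  | succ t ih =>
    intro a cnt hne hge hlt f
    push_cast at hlt hge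
    have hn : 1 ≤ a.length := List.length_pos_iff.mpr hne
    have hm0 : (0 : Int) ≤ (posOf a).length := by positivity
    have htm : (0 : Int) ≤ (t : Int) * (posOf a).length := by positivity
    have hcnt : cnt < k := by nlinarith
    have hlt1 : ((posFrom a 0).length : Int) < k - cnt := by
      rw [← posOf_eq_posFrom_zero]
      nlinarith
    have hfuel : (t + 1) * a.length + f = a.length + (t * a.length + f) := by ring
    rw [hfuel]
    rw [passC1 k a.length a 0 cnt (by omega) (by omega) hcnt hlt1 (t * a.length + f)]
    rw [decFrom_zero, ← posOf_eq_posFrom_zero]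
    have hge1 : ∀ x ∈ decBy 1 a, 0 < x → (t : Int) ≤ x := by
      intro x hx h0
      rcases List.mem_map.mp hx with ⟨y, hy, rfl⟩
      by_cases hy0 : 0 < y
      · have := hge y hy hy0
        rw [if_pos hy0] at h0 ⊢
        omega
      · rw [if_neg hy0] at h0
        exact absurd h0 (by omega)
    have hne1 : decBy 1 a ≠ [] := by
      intro h
      have := length_decBy 1 a
      rw [h] at this
      simp at this
      omega
    have hlen1 : (decBy 1 a).length = a.length := length_decBy 1 a
    have hmle : ((posOf (decBy 1 a)).length : Int) ≤ (posOf a).length := by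
      rw [posOf_decBy_filter]
      exact_mod_cast List.length_filter_le _ _
    have hlt2 : (t : Int) * (posOf (decBy 1 a)).length
        < k - (cnt + ((posOf a).length : Int)) := by
      rcases Nat.eq_zero_or_pos t with ht0 | ht1
      · subst ht0
        push_cast
        nlinarith
      · have hposeq : posOf (decBy 1 a) = posOf a := by
          apply posOf_decBy
          intro x hx h0
          have := hge x hx h0
          omega
        rw [hposeq]
        nlinarith
    have ihres := ih (decBy 1 a) (cnt + ((posOf a).length : Int)) hne1 hge1 hlt2 f
    rw [hlen1] at ihres
    rw [ihres]
    rw [decBy_decBy (t : Int) 1 a (by positivity) (by intro x hx h0; exact hge x hx h0)]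
    have harith : (t : Int) * (posOf (decBy 1 a)).length = (t : Int) * (posOf a).length := by
      rcases Nat.eq_zero_or_pos t with ht0 | ht1
      · subst ht0; push_cast; ring
      · have hposeq : posOf (decBy 1 a) = posOf a := by
          apply posOf_decBy
          intro x hx h0
          have := hge x hx h0
          omega
        rw [hposeq]
    rw [harith]
    congr 1
    all_goals push_cast
    all_goals ring

-- ---- min of the positive values ----
theorem min_posOf_spec (a : List Int) (h : posOf a ≠ []) :
    let vals := (posOf a).map (fun i => a.getD i 0)
    let mn := (vals.min?).getD 0
    (∃ i ∈ posOf a, a.getD i 0 = mn) ∧ (∀ i ∈ posOf a, mn ≤ a.getD i 0) ∧ 1 ≤ mn := by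
  intro vals mn
  have hvne : vals ≠ [] := by
    intro hv
    exact h (by simpa [vals] using congrArg List.length hv)
  obtain ⟨v, hv⟩ : ∃ v, vals.min? = some v := by
    cases hval : vals with
    | nil => exact absurd hval hvne
    | cons x xs => exact ⟨_, List.min?_cons' ..⟩
  have hmn : mn = v := by simp [mn, hv]
  rcases List.min?_eq_some_iff.mp hv with ⟨hmem, hle⟩
  rcases List.mem_map.mp hmem with ⟨i, hi, hiv⟩
  refine ⟨⟨i, hi, by rw [hiv, hmn]⟩, ?_, ?_⟩
  · intro j hj
    rw [hmn]
    exact hle _ (List.mem_map.mpr ⟨j, hj, rfl⟩)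
  · rw [hmn, ← hiv]
    have := mem_posOf a i hi
    omega

theorem posOf_length_lt_of_min (a : List Int) (mn : Int) (i0 : Nat)
    (hi0 : i0 ∈ posOf a) (hmin : a.getD i0 0 = mn) :
    (posOf (decBy mn a)).length < (posOf a).length := by
  rw [posOf_decBy_filter]
  apply List.length_filter_lt_length_iff_exists.mpr
  refine ⟨i0, hi0, ?_⟩
  have h0 := (mem_posOf a i0 hi0).2
  have hlt := (mem_posOf a i0 hi0).1
  rw [getD_decBy mn a i0 hlt, if_pos h0, hmin]
  simp

-- ---- small bridges for the B side ----
theorem eatB_succ (f : Nat) (a : List Int) (rem : Int) (last : Option Nat) :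
    eatB (f + 1) a rem last =
      if 0 < rem then
        if (posOf a).isEmpty then (a, last)
        else
          if 0 < min (PySem.Int.floordiv rem ((posOf a).length : Int))
              ((((posOf a).map (fun i => a.getD i 0)).min?).getD 0) then
            eatB f
              (decBy (min (PySem.Int.floordiv rem ((posOf a).length : Int))
                ((((posOf a).map (fun i => a.getD i 0)).min?).getD 0)) a)
              (rem - (min (PySem.Int.floordiv rem ((posOf a).length : Int))
                ((((posOf a).map (fun i => a.getD i 0)).min?).getD 0)) * ((posOf a).length : Int))
              (some ((posOf a).getLast?.getD 0))
          else
            ((List.range a.length).map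
                (fun i => if i ∈ (posOf a).take rem.toNat then a.getD i 0 - 1 else a.getD i 0),
             some (((posOf a).take rem.toNat).getLast?.getD 0))
      else (a, last) := rfl

theorem partial_map_eq_decTake (a : List Int) (j : Nat) :
    (List.range a.length).map
        (fun i => if i ∈ (posOf a).take j then a.getD i 0 - 1 else a.getD i 0)
      = decTake a 0 j := by
  unfold decTake
  rw [← posOf_eq_posFrom_zero]

theorem getLast?_getD_eq (l : List Nat) (h : l ≠ []) :
    l.getLast?.getD 0 = l.getD (l.length - 1) 0 := by
  rw [List.getLast?_eq_getElem?, List.getD_eq_getElem?_getD]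

theorem take_getLast?_getD (l : List Nat) (j : Nat) (h : j < l.length) :
    (l.take (j + 1)).getLast?.getD 0 = l.getD j 0 := by
  have hlen : (l.take (j + 1)).length = j + 1 := by
    simp
    omega
  have hne : l.take (j + 1) ≠ [] := by
    intro hnil
    rw [hnil] at hlen
    simp at hlen
  rw [getLast?_getD_eq _ hne, hlen]
  simp only [Nat.add_sub_cancel]
  rw [List.getD_eq_getElem?_getD, List.getD_eq_getElem?_getD,
    List.getElem?_take_of_lt (Nat.lt_succ_self j)]

theorem mn_le_of_mem (a : List Int) (mn : Int)
    (hmnle : ∀ i ∈ posOf a, mn ≤ a.getD i 0) :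
    ∀ x ∈ a, 0 < x → mn ≤ x := by
  intro x hx h0
  rcases List.mem_iff_getElem.mp hx with ⟨i, hi, rfl⟩
  have hmem : i ∈ posOf a := by
    unfold posOf
    refine List.mem_filter.mpr ⟨List.mem_range.mpr hi, ?_⟩
    rw [List.getD_eq_getElem _ _ hi]
    simpa using h0
  have := hmnle i hmem
  rwa [List.getD_eq_getElem _ _ hi] at this

theorem sumPos_decBy' (t : Int) (a : List Int) (ht : 0 ≤ t)
    (h : ∀ x ∈ a, 0 < x → t ≤ x) :
    sumPos (decBy t a) = sumPos a - t * (posOf a).length := by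
  rw [sumPos_decBy t a ht h, posOf_length_countP]

-- ---- one partial (or final full) sweep from index 0, ending with the k-th bite ----
theorem partialStep (k : Int) (a : List Int) (cnt : Int) (fA : Nat)
    (hne : a ≠ []) (hrem : 0 < k - cnt) (hlt : k - cnt ≤ ((posOf a).length : Int))
    (hfA : a.length + 1 ≤ fA) :
    eatA k fA a 0 cnt
      = (decTake a 0 (k - cnt).toNat,
         ((posOf a).getD ((k - cnt).toNat - 1) 0 + 1) % a.length) := by
  have hn1 : 1 ≤ a.length := List.length_pos_iff.mpr hne
  have hj1 : 1 ≤ (k - cnt).toNat := by omega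
  have hpass := passC2 k a.length a 0 cnt ((k - cnt).toNat - 1) (by omega) (by omega) (by omega)
    (by push_cast; omega)
    (by rw [← posOf_eq_posFrom_zero]; omega)
    fA (by omega)
  rw [hpass, ← posOf_eq_posFrom_zero]
  congr 2
  omega

-- ---- the main correspondence: A's bite loop = B's batched loop ----
theorem mainEat (k : Int) : ∀ (fB : Nat) (a : List Int) (cnt : Int) (last : Option Nat) (fA : Nat),
    a ≠ [] → 0 < k - cnt → k - cnt ≤ sumPos a →
    (posOf a).length + 2 ≤ fB →
    (k - cnt).toNat * a.length + a.length + 1 ≤ fA →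
    eatA k fA a 0 cnt
      = ((eatB fB a (k - cnt) last).1,
         (match (eatB fB a (k - cnt) last).2 with
          | none => 0
          | some p => (p + 1) % a.length)) := by
  intro fB
  induction fB with
  | zero => intro a cnt last fA hne hrem hsum hfB; omega
  | succ fB ih =>
    intro a cnt last fA hne hrem hsum hfB hfA
    have hn1 : 1 ≤ a.length := List.length_pos_iff.mpr hne
    have hSpos : 0 < sumPos a := by omega
    have hpne : posOf a ≠ [] := posOf_ne_nil_of_sumPos a hSpos
    have hpE : (posOf a).isEmpty = false := by
      cases hp : posOf a with
      | nil => exact absurd hp hpne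
      | cons x xs => rfl
    obtain ⟨⟨i0, hi0, hi0v⟩, hmnle, hmn1⟩ := min_posOf_spec a hpne
    have hm1 : (1 : Int) ≤ ((posOf a).length : Int) := by
      have := List.length_pos_iff.mpr hpne
      omega
    rw [eatB_succ, if_pos hrem, hpE]
    simp only [Bool.false_eq_true, if_false]
    by_cases hcase : k - cnt < ((posOf a).length : Int)
    · -- fewer bites left than positive entries: a single partial sweep
      have hfd0 : PySem.Int.floordiv (k - cnt) ((posOf a).length : Int) = 0 := by
        have h1 : PySem.Int.floordiv (k - cnt) ((posOf a).length : Int) < 1 := by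
          rw [PySem.Int.floordiv_lt_iff_lt_mul (by omega)]
          omega
        have h2 : (0 : Int) ≤ PySem.Int.floordiv (k - cnt) ((posOf a).length : Int) := by
          rw [PySem.Int.le_floordiv_iff_mul_le (by omega)]
          omega
        omega
      rw [hfd0]
      rw [if_neg (by omega : ¬ (0 : Int) < min 0 ((((posOf a).map (fun i => a.getD i 0)).min?).getD 0))]
      rw [partialStep k a cnt fA hne hrem (by omega) (by omega)]
      rw [partial_map_eq_decTake]
      have hjlt : (k - cnt).toNat - 1 < (posOf a).length := by omega
      have hlast : ((posOf a).take ((k - cnt).toNat - 1 + 1)).getLast?.getD 0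
          = (posOf a).getD ((k - cnt).toNat - 1) 0 := take_getLast?_getD _ _ hjlt
      rw [show (k - cnt).toNat = (k - cnt).toNat - 1 + 1 from by omega, hlast]
      simp only [Nat.add_sub_cancel]
    · -- at least one whole round of bites
      have hmle : ((posOf a).length : Int) ≤ k - cnt := by omega
      set mn : Int := (((posOf a).map (fun i => a.getD i 0)).min?).getD 0 with hmn
      set fd : Int := PySem.Int.floordiv (k - cnt) ((posOf a).length : Int) with hfd
      have hfd1 : 1 ≤ fd := by
        rw [hfd, PySem.Int.le_floordiv_iff_mul_le (by omega)]
        omega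
      set t : Int := min fd mn with ht
      have ht1 : 1 ≤ t := by rw [ht]; omega
      rw [if_pos (by omega : (0:Int) < t)]
      have htle_fd : t ≤ fd := min_le_left _ _
      have htle_mn : t ≤ mn := min_le_right _ _
      have htm_le : t * ((posOf a).length : Int) ≤ k - cnt := by
        have hb := (PySem.Int.le_floordiv_iff_mul_le
          (a := k - cnt) (b := ((posOf a).length : Int)) (q := t) (by omega)).mp
        rw [← hfd] at hb
        exact hb htle_fd
      have ht_le_rem : t ≤ k - cnt := by nlinarith [htm_le, hm1, ht1]
      set TN : Nat := t.toNat with hTN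
      have hTNc : (TN : Int) = t := Int.toNat_of_nonneg (by omega)
      have hvge : ∀ x ∈ a, 0 < x → mn ≤ x := mn_le_of_mem a mn hmnle
      by_cases hz : k - cnt - t * ((posOf a).length : Int) = 0
      · -- the k-th bite is the last bite of round TN
        have hTN1 : 1 ≤ TN := by omega
        have hge' : ∀ x ∈ a, 0 < x → ((TN - 1 : Nat) : Int) ≤ x := by
          intro x hx h0
          have h2 := hvge x hx h0
          omega
        have hmulle : (TN - 1) * a.length + (a.length + 1) ≤ fA := by
          have h1 : TN - 1 ≤ (k - cnt).toNat := by omega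
          have h2 : (TN - 1) * a.length ≤ (k - cnt).toNat * a.length :=
            Nat.mul_le_mul_right _ h1
          omega
        have hlt' : ((TN - 1 : Nat) : Int) * ((posOf a).length : Int) < k - cnt := by
          have e : ((TN - 1 : Nat) : Int) = t - 1 := by omega
          rw [e]
          nlinarith [hm1, ht1, htm_le]
        rw [show fA = (TN - 1) * a.length + (fA - (TN - 1) * a.length) from by omega]
        rw [rounds k (TN - 1) a cnt hne hge' hlt' (fA - (TN - 1) * a.length)]
        have hposeq2 : posOf (decBy ((TN - 1 : Nat) : Int) a) = posOf a := by
          apply posOf_decBy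
          intro x hx h0
          have := hvge x hx h0
          omega
        have hlen2 : (decBy ((TN - 1 : Nat) : Int) a).length = a.length := length_decBy _ _
        have hne2 : decBy ((TN - 1 : Nat) : Int) a ≠ [] := by
          intro h
          rw [h] at hlen2
          simp at hlen2
          omega
        have hrem2 : k - (cnt + ((TN - 1 : Nat) : Int) * ((posOf a).length : Int))
            = ((posOf a).length : Int) := by
          have e : ((TN - 1 : Nat) : Int) = t - 1 := by omega
          rw [e]
          have e2 : (t - 1) * ((posOf a).length : Int)
              = t * ((posOf a).length : Int) - ((posOf a).length : Int) := by ring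
          omega
        rw [partialStep k (decBy ((TN - 1 : Nat) : Int) a)
          (cnt + ((TN - 1 : Nat) : Int) * ((posOf a).length : Int))
          (fA - (TN - 1) * a.length) hne2 (by omega)
          (by rw [hrem2, hposeq2])
          (by rw [hlen2]; omega)]
        rw [hrem2, hposeq2, hlen2]
        simp only [Int.toNat_natCast]
        rw [decTake_all _ _ (by rw [← posOf_eq_posFrom_zero, hposeq2])]
        rw [decBy_decBy 1 ((TN - 1 : Nat) : Int) a (by omega)
          (by intro x hx h0; have := hvge x hx h0; omega)]
        rw [show (1 + ((TN - 1 : Nat) : Int)) = t from by omega]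
        obtain ⟨fB2, rfl⟩ : ∃ fB2, fB = fB2 + 1 := ⟨fB - 1, by omega⟩
        rw [eatB_succ]
        rw [if_neg (by omega : ¬ (0:Int) < k - cnt - t * ((posOf a).length : Int))]
        rw [getLast?_getD_eq (posOf a) hpne]
      · -- bites remain after the t whole rounds
        have hz' : 0 < k - cnt - t * ((posOf a).length : Int) := by omega
        have hgeT : ∀ x ∈ a, 0 < x → ((TN : Nat) : Int) ≤ x := by
          intro x hx h0
          have := hvge x hx h0
          omega
        have hltT : ((TN : Nat) : Int) * ((posOf a).length : Int) < k - cnt := by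
          rw [hTNc]
          omega
        have hmulle : TN * a.length + (a.length + 1) ≤ fA := by
          have h1 : TN + 1 ≤ (k - cnt).toNat := by
            have : t + 1 ≤ k - cnt := by nlinarith [htm_le, hm1, ht1]
            omega
          have h2 : (TN + 1) * a.length ≤ (k - cnt).toNat * a.length :=
            Nat.mul_le_mul_right _ h1
          have h3 : (TN + 1) * a.length = TN * a.length + a.length := by ring
          omega
        rw [show fA = TN * a.length + (fA - TN * a.length) from by omega]
        rw [rounds k TN a cnt hne hgeT hltT (fA - TN * a.length)]
        rw [hTNc]
        have hlen2 : (decBy t a).length = a.length := length_decBy _ _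
        have hne2 : decBy t a ≠ [] := by
          intro h
          rw [h] at hlen2
          simp at hlen2
          omega
        have hrem2 : k - (cnt + t * ((posOf a).length : Int))
            = k - cnt - t * ((posOf a).length : Int) := by ring
        by_cases hmc : mn ≤ fd
        · -- t = mn: at least one positive entry reaches zero, recurse
          have htmn : t = mn := by rw [ht]; omega
          have hposlt : (posOf (decBy t a)).length < (posOf a).length := by
            rw [htmn]
            exact posOf_length_lt_of_min a mn i0 hi0 hi0v
          have hsum2 : k - (cnt + t * ((posOf a).length : Int)) ≤ sumPos (decBy t a) := by
            rw [sumPos_decBy' t a (by omega) (by intro x hx h0; have := hvge x hx h0; omega)]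
            omega
          have hfA2 : (k - (cnt + t * ((posOf a).length : Int))).toNat * (decBy t a).length
              + (decBy t a).length + 1 ≤ fA - TN * a.length := by
            rw [hlen2, hrem2]
            have h1 : (k - cnt - t * ((posOf a).length : Int)).toNat + TN ≤ (k - cnt).toNat := by
              have : t ≤ t * ((posOf a).length : Int) := by nlinarith [hm1, ht1]
              omega
            have h2 : ((k - cnt - t * ((posOf a).length : Int)).toNat + TN) * a.length
                ≤ (k - cnt).toNat * a.length := Nat.mul_le_mul_right _ h1
            have h3 : ((k - cnt - t * ((posOf a).length : Int)).toNat + TN) * a.length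
                = (k - cnt - t * ((posOf a).length : Int)).toNat * a.length + TN * a.length := by
              ring
            omega
          have ihres := ih (decBy t a) (cnt + t * ((posOf a).length : Int))
            (some ((posOf a).getLast?.getD 0)) (fA - TN * a.length) hne2
            (by omega) hsum2 (by omega) hfA2
          rw [hrem2] at ihres
          rw [ihres, hlen2]
        · -- t = fd < mn: at most one more (partial) sweep, handled inline
          have htfd : t = fd := by rw [ht]; omega
          have hrm' : k - cnt - t * ((posOf a).length : Int) < ((posOf a).length : Int) := by
            have hb := (PySem.Int.floordiv_lt_iff_lt_mul
              (a := k - cnt) (b := ((posOf a).length : Int)) (q := t + 1) (by omega)).mp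
            rw [← hfd] at hb
            have := hb (by omega)
            nlinarith [this]
          have hposeq2 : posOf (decBy t a) = posOf a := by
            apply posOf_decBy
            intro x hx h0
            have := hvge x hx h0
            omega
          have hpne2 : posOf (decBy t a) ≠ [] := by rw [hposeq2]; exact hpne
          have hpE2 : (posOf (decBy t a)).isEmpty = false := by rw [hposeq2]; exact hpE
          obtain ⟨⟨i2, hi2, hi2v⟩, hmnle2, hmn12⟩ := min_posOf_spec (decBy t a) hpne2
          have hfd20 : PySem.Int.floordiv (k - cnt - t * ((posOf a).length : Int))
              (((posOf (decBy t a)).length : Int)) = 0 := by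
            rw [hposeq2]
            have h1 : PySem.Int.floordiv (k - cnt - t * ((posOf a).length : Int))
                ((posOf a).length : Int) < 1 := by
              rw [PySem.Int.floordiv_lt_iff_lt_mul (by omega)]
              omega
            have h2 : (0 : Int) ≤ PySem.Int.floordiv (k - cnt - t * ((posOf a).length : Int))
                ((posOf a).length : Int) := by
              rw [PySem.Int.le_floordiv_iff_mul_le (by omega)]
              omega
            omega
          obtain ⟨fB2, rfl⟩ : ∃ fB2, fB = fB2 + 1 := ⟨fB - 1, by omega⟩
          rw [eatB_succ, if_pos hz', hpE2]
          simp only [Bool.false_eq_true, if_false]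
          rw [hfd20]
          rw [if_neg (by omega : ¬ (0 : Int)
            < min 0 ((((posOf (decBy t a)).map (fun i => (decBy t a).getD i 0)).min?).getD 0))]
          rw [partialStep k (decBy t a) (cnt + t * ((posOf a).length : Int))
            (fA - TN * a.length) hne2 (by omega)
            (by rw [hposeq2, hrem2]; omega)
            (by rw [hlen2]; omega)]
          rw [hrem2, partial_map_eq_decTake, hposeq2, hlen2]
          have hjlt : (k - cnt - t * ((posOf a).length : Int)).toNat - 1 < (posOf a).length := by
            omega
          have hlast : ((posOf a).take ((k - cnt - t * ((posOf a).length : Int)).toNat - 1 + 1)).getLast?.getD 0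
              = (posOf a).getD ((k - cnt - t * ((posOf a).length : Int)).toNat - 1) 0 :=
            take_getLast?_getD _ _ hjlt
          rw [show (k - cnt - t * ((posOf a).length : Int)).toNat
              = (k - cnt - t * ((posOf a).length : Int)).toNat - 1 + 1 from by omega, hlast]
          simp only [Nat.add_sub_cancel]

-- ===== VERDICT (by name: the statement is the Claim_ definition above) =====
theorem solution_spec : Claim_equal_solution := by
  unfold Claim_equal_solution Spec_solution
  intro a k _ hpre
  obtain ⟨hne, hsum⟩ := hpre
  have hn1 : 1 ≤ a.length := List.length_pos_iff.mpr hne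
  have hsum' : k ≤ sumPos a := hsum
  simp only [solution, solution_alt]
  by_cases hk : 0 < k
  · have hpos_le : (posOf a).length ≤ a.length := by
      have := List.length_filter_le (fun i => decide (0 < a.getD i 0)) (List.range a.length)
      simpa [posOf] using this
    have hfA : k.toNat * a.length + a.length + 1 ≤ (k.toNat + 1) * (a.length + 1) := by
      have e : (k.toNat + 1) * (a.length + 1) = k.toNat * a.length + k.toNat + a.length + 1 := by
        ring
      omega
    have hmain := mainEat k (a.length + 2) a 0 none ((k.toNat + 1) * (a.length + 1)) hne
      (by omega) (by omega) (by omega) (by simpa using hfA)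
    simp only [sub_zero] at hmain
    rw [hmain]
  · have hk0 : k.toNat = 0 := by omega
    have hA : eatA k ((k.toNat + 1) * (a.length + 1)) a 0 0 = (a, 0) := by
      rw [hk0]
      rw [show (0 + 1) * (a.length + 1) = a.length + 1 from by ring]
      rw [eatA_succ]
      rw [if_neg (by omega : ¬ (0 : Int) < k)]
    have hB : eatB (a.length + 2) a k none = (a, none) := by
      rw [show a.length + 2 = (a.length + 1) + 1 from rfl, eatB_succ]
      rw [if_neg (by omega : ¬ (0 : Int) < k)]
    rw [hA, hB]
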